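/-
  NON-VACUITY OF THE SSE HYPOTHESES: the interpreter's processor and start machine meet them.

      sseMicro_interp       `SseMicro (Microarch.ofConfig Interp.interpConfig)`: the microarchitecture record every interpreter of
                            the tree runs with (Intel, CPUID.SSE, CPUID.SSE2 of the Granite Rapids table)
      sseOK_start           `SseOK (User.startState c img entry rsp)`: the start machine's MXCSR is 1F80H

  (`User.Core.features` of the start machine is `User.boot_features`, model patch 0001.)
-/
import UserX.SseBase
namespace X86
namespace User

/-- The configuration of the start machine is the interpreter's processor. -/
theorem bootMachine_cfg (c : Nat) : (bootMachine c).cfg = Interp.interpConfig := rfl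

/-- **The interpreter's microarchitecture record meets `SseMicro`.** -/
theorem sseMicro_interp : SseMicro (Microarch.ofConfig Interp.interpConfig) where
  vendor := rfl
  cfgVendor := rfl
  sse := by
    show Interp.interpConfig.has Feature.sse = true
    rw [← bootMachine_cfg 0]
    exact (boot_features 0).sse
  sse2 := by
    show Interp.interpConfig.has Feature.sse2 = true
    rw [← bootMachine_cfg 0]
    exact (boot_features 0).sse2

/-- **The start state has every SIMD floating-point exception masked** (MXCSR = 1F80H at reset). -/
theorem sseOK_start (c : Nat) (img : ByteArray) (entry rsp : Word) : SseOK (startState c img entry rsp) := by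
  constructor
  show (startMachine c img entry rsp).mxcsr &&& 0x1F80 = 0x1F80
  have e : (startMachine c img entry rsp).mxcsr = (bootMachine 0).mxcsr := rfl
  rw [e]
  decide

end User
end X86
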